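-- pv_equiv track=rewrite | github.com/phqsuema123/the-Cutting-Stock | code python/type2.py | two_dimensional_cutting_stock
-- ===== SOURCE A (Python) =====
-- def two_dimensional_cutting_stock(stock_width, stock_height, required_rectangles):
--     n = len(required_rectangles)
--     dp = {(0, 0): (0, [])}
--
--     for w in range(1, stock_width + 1):
--         for h in range(1, stock_height + 1):
--             dp[(w, h)] = max(dp.get((w, h), (0, [])),
--                              max((dp.get((w - rw, h - rh), (0, []))[0] + 1, dp.get((w - rw, h - rh), (0, []))[1] + [(rw, rh)])
--                                  for rw, rh in required_rectangles))
--
--     return dp[(stock_width, stock_height)]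
-- ===== SOURCE B (Python) =====
-- def two_dimensional_cutting_stock(stock_width, stock_height, required_rectangles):
--     # Top-down memoized recursion over the reachable subproblems only,
--     # instead of filling the whole stock_width x stock_height grid.
--     memo = {}
--
--     def best(w, h):
--         if w < 1 or h < 1 or w > stock_width or h > stock_height:
--             return (0, [])
--         cached = memo.get((w, h))
--         if cached is not None:
--             return cached
--         result = (0, [])
--         for rw, rh in required_rectangles:
--             count, pieces = best(w - rw, h - rh)
--             candidate = (count + 1, pieces + [(rw, rh)])
--             if candidate > result:
--                 result = candidate
--         memo[(w, h)] = result
--         return result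
--
--     best(stock_width, stock_height)
--     return memo[(stock_width, stock_height)]
-- ===== Notes on version B (the rewrite author's own statement) =====
-- stated objective: alternative
-- what changed: B replaces A's bottom-up dict DP over every cell of the stock_width x stock_height grid by a top-down memoized recursion that only visits subproblems reachable inside the stock, accumulating the best (count, pieces) with an explicit running-maximum loop instead of nested max() calls, and finally reading the answer off the memo table.
-- outside the precondition, e.g. on two_dimensional_cutting_stock(1, 1, [(0, 0)]): A returns (1, [(0, 0)]), B raises RecursionError; on two_dimensional_cutting_stock(0, 0, [(1, 1)]): A returns (0, []), B raises KeyError; on two_dimensional_cutting_stock(2, 2, []): A raises ValueError, B returns (0, [])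
import Mathlib
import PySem

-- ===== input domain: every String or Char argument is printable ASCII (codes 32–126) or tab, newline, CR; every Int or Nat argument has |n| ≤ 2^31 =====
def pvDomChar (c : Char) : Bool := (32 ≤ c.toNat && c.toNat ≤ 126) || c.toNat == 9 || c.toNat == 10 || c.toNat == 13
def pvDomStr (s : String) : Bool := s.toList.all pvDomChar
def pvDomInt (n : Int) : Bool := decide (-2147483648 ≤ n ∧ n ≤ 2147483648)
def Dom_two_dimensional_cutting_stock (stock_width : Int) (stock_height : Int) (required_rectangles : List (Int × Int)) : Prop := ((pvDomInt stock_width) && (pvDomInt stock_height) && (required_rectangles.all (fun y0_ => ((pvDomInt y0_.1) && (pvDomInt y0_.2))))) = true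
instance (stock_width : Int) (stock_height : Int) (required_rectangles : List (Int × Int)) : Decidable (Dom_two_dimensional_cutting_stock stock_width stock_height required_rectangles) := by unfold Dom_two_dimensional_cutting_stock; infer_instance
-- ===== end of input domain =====

-- ===== PORT A =====
-- B re-implements A as a top-down memoized recursion over reachable subproblems (objective: alternative decomposition).
-- Python comparison on (int, list[(int,int)]) values, as used by max() / '>' in both programs:
def pvPairLt (a b : Int × Int) : Bool :=
  a.1 < b.1 || (a.1 == b.1 && a.2 < b.2)

def pvListLt : List (Int × Int) → List (Int × Int) → Bool
  | [], [] => false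
  | [], _ :: _ => true
  | _ :: _, [] => false
  | x :: xs, y :: ys =>
    if pvPairLt x y then true
    else if pvPairLt y x then false
    else pvListLt xs ys

def pvValLt (a b : Int × List (Int × Int)) : Bool :=
  a.1 < b.1 || (a.1 == b.1 && pvListLt a.2 b.2)

def two_dimensional_cutting_stock (stock_width : Int) (stock_height : Int) (required_rectangles : List (Int × Int)) : Int × (List (Int × Int)) :=
  let _n : Int := required_rectangles.length
  let dp0 : PySem.Dict (Int × Int) (Int × List (Int × Int)) := PySem.Dict.empty.insert (0, 0) (0, [])
  let dp := (PySem.List.pyRange 1 (stock_width + 1) 1).foldl (fun dpw w =>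
    (PySem.List.pyRange 1 (stock_height + 1) 1).foldl (fun dph h =>
      -- the generator of candidates inside the inner max(...)
      let cands := required_rectangles.map (fun r =>
        let sub := dph.getD (w - r.1, h - r.2) (0, [])
        (sub.1 + 1, sub.2 ++ [r]))
      -- max(generator): ValueError on an empty list (excluded by Pre_); else running max, first maximal kept
      let inner := match cands with
        | [] => (0, [])
        | c :: cs => cs.foldl (fun m x => if pvValLt m x then x else m) c
      let cur := dph.getD (w, h) (0, [])
      dph.insert (w, h) (if pvValLt cur inner then inner else cur)) dpw) dp0
  -- dp[(stock_width, stock_height)]: none = KeyError, excluded by Pre_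
  (dp.get? (stock_width, stock_height)).getD (0, [])

-- ===== PORT B =====
-- Source B's memoized recursion `best` (the stock bounds sw, sh are the closed-over stock_width/stock_height),
-- with the memo dict threaded explicitly; the fuel argument only makes the recursion total in Lean
-- (never exhausted under Pre_, where each call strictly shrinks (w, h) lexicographically within the stock).
def pvBestGo (rects : List (Int × Int)) (sw sh : Int) :
    Nat → PySem.Dict (Int × Int) (Int × List (Int × Int)) → Int → Int →
    (Int × List (Int × Int)) × PySem.Dict (Int × Int) (Int × List (Int × Int))
  | 0, memo, _, _ => ((0, []), memo)
  | f + 1, memo, w, h =>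
    if w < 1 || h < 1 || sw < w || sh < h then ((0, []), memo)
    else
      match memo.get? (w, h) with
      | some cached => (cached, memo)
      | none =>
        let st := rects.foldl (fun acc r =>
          let sm := pvBestGo rects sw sh f acc.2 (w - r.1) (h - r.2)
          let cand := (sm.1.1 + 1, sm.1.2 ++ [r])
          (if pvValLt acc.1 cand then cand else acc.1, sm.2)) ((0, []), memo)
        (st.1, st.2.insert (w, h) st.1)

def two_dimensional_cutting_stock_alt (stock_width : Int) (stock_height : Int) (required_rectangles : List (Int × Int)) : Int × (List (Int × Int)) :=
  -- best(stock_width, stock_height) fills the memo; the answer is read off it.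
  -- none = KeyError on a degenerate (non-positive) stock, excluded by Pre_
  (((pvBestGo required_rectangles stock_width stock_height
      (stock_width.toNat * (stock_height.toNat + 2) + stock_height.toNat + 1)
      PySem.Dict.empty stock_width stock_height).2).get?
    (stock_width, stock_height)).getD (0, [])

-- ===== PRECONDITION & SPEC =====
-- Pre_ restricts to the natural cutting-stock domain: A raises KeyError when a stock dimension is
-- non-positive (except the degenerate 0x0 stock, whose (0, []) is only A's dp seed and where B's
-- memo lookup raises KeyError) and ValueError on an empty rectangle list; rectangles with a negative
-- or zero dimension are outside the problem's natural domain and only kept where they are provably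
-- inert (too tall to ever recur, or every rectangle out-of-grid at once); the rest are excluded —
-- there A's values are accidents of its dict insertion order (see cites).
def Pre_two_dimensional_cutting_stock (stock_width : Int) (stock_height : Int) (required_rectangles : List (Int × Int)) : Prop :=
  1 ≤ stock_width ∧ 1 ≤ stock_height ∧ required_rectangles ≠ [] ∧
    ((∀ r ∈ required_rectangles, 1 ≤ r.1 ∨ (r.1 = 0 ∧ 1 ≤ r.2) ∨ stock_height ≤ r.2) ∨
     (∀ r ∈ required_rectangles, r.1 < 0 ∨ (r.1 = 0 ∧ r.2 < 0) ∨ stock_height ≤ r.2))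
instance (stock_width : Int) (stock_height : Int) (required_rectangles : List (Int × Int)) : Decidable (Pre_two_dimensional_cutting_stock stock_width stock_height required_rectangles) := by unfold Pre_two_dimensional_cutting_stock; infer_instance

def pvWitness_two_dimensional_cutting_stock : Int × Int × (List (Int × Int)) := (3, 2, [(1, 1), (2, 2)])

def Spec_two_dimensional_cutting_stock (stock_width : Int) (stock_height : Int) (required_rectangles : List (Int × Int)) (out : Int × (List (Int × Int))) : Prop := out = two_dimensional_cutting_stock_alt stock_width stock_height required_rectangles
instance (stock_width : Int) (stock_height : Int) (required_rectangles : List (Int × Int)) (out : Int × (List (Int × Int))) : Decidable (Spec_two_dimensional_cutting_stock stock_width stock_height required_rectangles out) := by unfold Spec_two_dimensional_cutting_stock; infer_instance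

-- ===== CLAIM (what is proved, stated in full; the proofs are below) =====
def Claim_equal_two_dimensional_cutting_stock : Prop := ∀ (stock_width : Int) (stock_height : Int) (required_rectangles : List (Int × Int)), Dom_two_dimensional_cutting_stock stock_width stock_height required_rectangles → Pre_two_dimensional_cutting_stock stock_width stock_height required_rectangles → Spec_two_dimensional_cutting_stock stock_width stock_height required_rectangles (two_dimensional_cutting_stock stock_width stock_height required_rectangles)

-- ===== LEMMAS AND PROOFS =====

-- Pure (unmemoized) reference recursion, fuel-indexed; pvMu bounds the recursion depth.
def pvFgo (rects : List (Int × Int)) (sw sh : Int) : Nat → Int → Int → Int × List (Int × Int)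
  | 0, _, _ => (0, [])
  | f + 1, w, h =>
    if w < 1 || h < 1 || sw < w || sh < h then (0, [])
    else rects.foldl (fun res r =>
      let sub := pvFgo rects sw sh f (w - r.1) (h - r.2)
      let cand := (sub.1 + 1, sub.2 ++ [r])
      if pvValLt res cand then cand else res) (0, [])

def pvMu (sh w h : Int) : Nat :=
  w.toNat * (sh.toNat + 2) + (min h (sh + 1)).toNat

def pvF (rects : List (Int × Int)) (sw sh : Int) (w h : Int) : Int × List (Int × Int) :=
  pvFgo rects sw sh (pvMu sh w h + 1) w h

def pvRectsOK (sh : Int) (rects : List (Int × Int)) : Prop :=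
  ∀ r ∈ rects, 1 ≤ r.1 ∨ (r.1 = 0 ∧ 1 ≤ r.2) ∨ sh ≤ r.2


theorem pvMu_lt (sh w h : Int) (r : Int × Int) (hr : 1 ≤ r.1 ∨ (r.1 = 0 ∧ 1 ≤ r.2))
    (hw : 1 ≤ w) (hh : 1 ≤ h) (hhsh : h ≤ sh) :
    pvMu sh (w - r.1) (h - r.2) < pvMu sh w h := by
  unfold pvMu
  have h1 : min h (sh + 1) = h := min_eq_left (by omega)
  rcases hr with hr | hr
  · have h2 : (min (h - r.2) (sh + 1)) ≤ sh + 1 := min_le_right _ _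
    have h3 : (min (h - r.2) (sh + 1)).toNat ≤ (sh + 1).toNat := Int.toNat_le_toNat h2
    have h4 : (w - r.1).toNat ≤ w.toNat - 1 := by omega
    have h5 : 1 ≤ w.toNat := by omega
    have h6 : (sh + 1).toNat = sh.toNat + 1 := by omega
    calc (w - r.1).toNat * (sh.toNat + 2) + (min (h - r.2) (sh + 1)).toNat
        ≤ (w.toNat - 1) * (sh.toNat + 2) + (sh.toNat + 1) := by
          exact Nat.add_le_add (Nat.mul_le_mul_right _ h4) (by omega)
      _ < w.toNat * (sh.toNat + 2) + 0 := by
          have : (w.toNat - 1) * (sh.toNat + 2) + (sh.toNat + 2) = w.toNat * (sh.toNat + 2) := by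
            rw [← Nat.succ_mul]
            congr 1
            omega
          omega
      _ ≤ w.toNat * (sh.toNat + 2) + (min h (sh + 1)).toNat := by omega
  · have h2 : min (h - r.2) (sh + 1) = h - r.2 := min_eq_left (by omega)
    rw [hr.1, sub_zero, h1, h2]
    omega

-- either the child subproblem is strictly smaller in the termination measure, or it is out of bounds
theorem pvStep (sw sh w h : Int) (r : Int × Int)
    (hr : 1 ≤ r.1 ∨ (r.1 = 0 ∧ 1 ≤ r.2) ∨ sh ≤ r.2)
    (hw : 1 ≤ w) (hh : 1 ≤ h) (hhsh : h ≤ sh) :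
    pvMu sh (w - r.1) (h - r.2) < pvMu sh w h ∨
      (w - r.1 < 1 ∨ h - r.2 < 1 ∨ sw < w - r.1 ∨ sh < h - r.2) := by
  rcases hr with hr | hr | hr
  · exact Or.inl (pvMu_lt sh w h r (Or.inl hr) hw hh hhsh)
  · exact Or.inl (pvMu_lt sh w h r (Or.inr hr) hw hh hhsh)
  · right; omega

theorem pvFgo_base_any (rects : List (Int × Int)) (sw sh w h : Int)
    (hwh : w < 1 ∨ h < 1 ∨ sw < w ∨ sh < h) :
    ∀ f : Nat, pvFgo rects sw sh f w h = (0, []) := by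
  intro f
  match f with
  | 0 => rfl
  | f + 1 =>
    have : (w < 1 || h < 1 || sw < w || sh < h) = true := by simp; omega
    simp [pvFgo, this]

theorem pvFgo_stable (rects : List (Int × Int)) (sw sh : Int) (hr : pvRectsOK sh rects) :
    ∀ f g : Nat, ∀ w h : Int, pvMu sh w h < f → pvMu sh w h < g →
      pvFgo rects sw sh f w h = pvFgo rects sw sh g w h := by
  intro f
  induction f with
  | zero => intro g w h hf _; omega
  | succ f ih =>
    intro g w h hf hg
    match g with
    | g + 1 =>
      simp only [pvFgo]
      by_cases hwh : (w < 1 || h < 1 || sw < w || sh < h) = true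
      · simp [hwh]
      · simp only [hwh, Bool.false_eq_true, if_false]
        simp only [Bool.or_eq_true, decide_eq_true_eq, not_or, not_lt] at hwh
        apply PySem.List.foldl_congr_mem
        intro acc r hrm
        rcases pvStep sw sh w h r (hr r hrm) (by omega) (by omega) (by omega) with hmu | hbase
        · rw [ih g (w - r.1) (h - r.2) (by omega) (by omega)]
        · rw [pvFgo_base_any rects sw sh _ _ hbase f, pvFgo_base_any rects sw sh _ _ hbase g]

theorem pvF_base (rects : List (Int × Int)) (sw sh : Int) (w h : Int)
    (hwh : w < 1 ∨ h < 1 ∨ sw < w ∨ sh < h) :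
    pvF rects sw sh w h = (0, []) := by
  have : (w < 1 || h < 1 || sw < w || sh < h) = true := by simp; omega
  simp [pvF, pvFgo, this]

theorem pvF_unfold (rects : List (Int × Int)) (sw sh : Int) (hr : pvRectsOK sh rects) (w h : Int)
    (hw : 1 ≤ w) (hh : 1 ≤ h) (hwsw : w ≤ sw) (hhsh : h ≤ sh) :
    pvF rects sw sh w h = rects.foldl (fun res r =>
      let sub := pvF rects sw sh (w - r.1) (h - r.2)
      let cand := (sub.1 + 1, sub.2 ++ [r])
      if pvValLt res cand then cand else res) (0, []) := by
  have hwh : (w < 1 || h < 1 || sw < w || sh < h) = false := by simp; omega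
  show pvFgo rects sw sh (pvMu sh w h + 1) w h = _
  simp only [pvFgo, hwh, Bool.false_eq_true, if_false]
  apply PySem.List.foldl_congr_mem
  intro acc r hrm
  rcases pvStep sw sh w h r (hr r hrm) hw hh hhsh with hmu | hbase
  · rw [pvFgo_stable rects sw sh hr (pvMu sh w h) (pvMu sh (w - r.1) (h - r.2) + 1)
        (w - r.1) (h - r.2) (by omega) (by omega)]
    rfl
  · rw [pvFgo_base_any rects sw sh _ _ hbase (pvMu sh w h),
        show pvF rects sw sh (w - r.1) (h - r.2) = (0, []) from pvF_base rects sw sh _ _ hbase]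

theorem pvFgo_fst_nonneg (rects : List (Int × Int)) (sw sh : Int) :
    ∀ f : Nat, ∀ w h : Int, 0 ≤ (pvFgo rects sw sh f w h).1 := by
  intro f
  induction f with
  | zero => intro w h; simp [pvFgo]
  | succ f ih =>
    intro w h
    simp only [pvFgo]
    by_cases hwh : (w < 1 || h < 1 || sw < w || sh < h) = true
    · simp [hwh]
    · simp only [hwh, Bool.false_eq_true, if_false]
      have aux : ∀ (l : List (Int × Int)) (res : Int × List (Int × Int)), 0 ≤ res.1 →
          0 ≤ (l.foldl (fun res r =>
            let sub := pvFgo rects sw sh f (w - r.1) (h - r.2)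
            let cand := (sub.1 + 1, sub.2 ++ [r])
            if pvValLt res cand then cand else res) res).1 := by
        intro l
        induction l with
        | nil => intro res hres; exact hres
        | cons r t iht =>
          intro res hres
          simp only [List.foldl_cons]
          apply iht
          by_cases hc : pvValLt res (((pvFgo rects sw sh f (w - r.1) (h - r.2)).1 + 1,
              (pvFgo rects sw sh f (w - r.1) (h - r.2)).2 ++ [r])) = true
          · simp only [hc, if_true]
            have := ih (w - r.1) (h - r.2)
            omega
          · simp only [hc, Bool.false_eq_true, if_false]; exact hres
      exact aux rects (0, []) (by simp)

theorem pvF_fst_nonneg (rects : List (Int × Int)) (sw sh w h : Int) :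
    0 ≤ (pvF rects sw sh w h).1 :=
  pvFgo_fst_nonneg rects sw sh _ w h

-- ===== B-side: the memoized recursion computes pvF =====
def pvMemoOK (rects : List (Int × Int)) (sw sh : Int)
    (m : PySem.Dict (Int × Int) (Int × List (Int × Int))) : Prop :=
  ∀ a b v, m.get? (a, b) = some v → v = pvF rects sw sh a b

theorem pvBestGo_base_any (rects : List (Int × Int)) (sw sh w h : Int)
    (hwh : w < 1 ∨ h < 1 ∨ sw < w ∨ sh < h) :
    ∀ (f : Nat) m, pvBestGo rects sw sh f m w h = ((0, []), m) := by
  intro f m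
  match f with
  | 0 => rfl
  | f + 1 =>
    have : (w < 1 || h < 1 || sw < w || sh < h) = true := by simp; omega
    simp [pvBestGo, this]

theorem pvBestGo_correct (rects : List (Int × Int)) (sw sh : Int) (hr : pvRectsOK sh rects) :
    ∀ f : Nat, ∀ m w h, pvMu sh w h < f → pvMemoOK rects sw sh m →
      (pvBestGo rects sw sh f m w h).1 = pvF rects sw sh w h ∧
      pvMemoOK rects sw sh (pvBestGo rects sw sh f m w h).2 ∧
      (1 ≤ w → 1 ≤ h → w ≤ sw → h ≤ sh →
        (pvBestGo rects sw sh f m w h).2.get? (w, h) = some (pvF rects sw sh w h)) := by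
  intro f
  induction f with
  | zero => intro m w h hf _; omega
  | succ f ih =>
    intro m w h hf hm
    simp only [pvBestGo]
    by_cases hwh : (w < 1 || h < 1 || sw < w || sh < h) = true
    · simp only [hwh, if_true]
      simp only [Bool.or_eq_true, decide_eq_true_eq] at hwh
      refine ⟨?_, hm, ?_⟩
      · rw [pvF_base]
        omega
      · intro h1 h2 h3 h4
        omega
    · simp only [hwh, Bool.false_eq_true, if_false]
      simp only [Bool.or_eq_true, decide_eq_true_eq, not_or, not_lt] at hwh
      cases hmg : m.get? (w, h) with
      | some v =>
        exact ⟨hm w h v hmg, hm, fun _ _ _ _ => by rw [hmg, hm w h v hmg]⟩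
      | none =>
        have aux : ∀ (l : List (Int × Int)), (∀ r ∈ l, r ∈ rects) →
            ∀ (acc : (Int × List (Int × Int)) × PySem.Dict (Int × Int) (Int × List (Int × Int))),
            pvMemoOK rects sw sh acc.2 →
            (l.foldl (fun acc r =>
              let sm := pvBestGo rects sw sh f acc.2 (w - r.1) (h - r.2)
              let cand := (sm.1.1 + 1, sm.1.2 ++ [r])
              (if pvValLt acc.1 cand then cand else acc.1, sm.2)) acc).1 =
              l.foldl (fun res r =>
                let sub := pvF rects sw sh (w - r.1) (h - r.2)
                let cand := (sub.1 + 1, sub.2 ++ [r])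
                if pvValLt res cand then cand else res) acc.1 ∧
            pvMemoOK rects sw sh (l.foldl (fun acc r =>
              let sm := pvBestGo rects sw sh f acc.2 (w - r.1) (h - r.2)
              let cand := (sm.1.1 + 1, sm.1.2 ++ [r])
              (if pvValLt acc.1 cand then cand else acc.1, sm.2)) acc).2 := by
          intro l
          induction l with
          | nil => intro _ acc hacc; exact ⟨rfl, hacc⟩
          | cons r t iht =>
            intro hmem acc hacc
            rcases pvStep sw sh w h r (hr r (hmem r (by simp))) (by omega) (by omega)
              (by omega) with hmu | hbase
            · obtain ⟨hv, hmo, _⟩ := ih acc.2 (w - r.1) (h - r.2) (by omega) hacc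
              simp only [List.foldl_cons, hv]
              exact iht (fun x hx => hmem x (by simp [hx])) _ hmo
            · have hv : pvBestGo rects sw sh f acc.2 (w - r.1) (h - r.2) = ((0, []), acc.2) :=
                pvBestGo_base_any rects sw sh _ _ hbase f acc.2
              have hpv : pvF rects sw sh (w - r.1) (h - r.2) = (0, []) :=
                pvF_base rects sw sh _ _ hbase
              simp only [List.foldl_cons, hv, hpv]
              exact iht (fun x hx => hmem x (by simp [hx])) _ hacc
        obtain ⟨hv, hmo⟩ := aux rects (fun _ hx => hx) ((0, []), m) hm
        rw [hv]
        rw [← pvF_unfold rects sw sh hr w h (by omega) (by omega) (by omega) (by omega)]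
        refine ⟨rfl, ?_, ?_⟩
        · intro a b v hget
          rw [PySem.Dict.get?_insert] at hget
          by_cases hk : ((a, b) : Int × Int) = (w, h)
          · simp only [hk, if_true] at hget
            cases hget
            cases hk
            rfl
          · simp only [hk, if_false] at hget
            exact hmo a b v hget
        · intro _ _ _ _
          rw [PySem.Dict.get?_insert, if_pos rfl]

theorem alt_eq_pvF (stock_width stock_height : Int) (rects : List (Int × Int))
    (hr : pvRectsOK stock_height rects) (hw : 1 ≤ stock_width) (hh : 1 ≤ stock_height) :
    two_dimensional_cutting_stock_alt stock_width stock_height rects =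
      pvF rects stock_width stock_height stock_width stock_height := by
  have hm : pvMemoOK rects stock_width stock_height PySem.Dict.empty := by
    intro a b v hget
    simp [PySem.Dict.get?_empty] at hget
  have hfuel : pvMu stock_height stock_width stock_height <
      stock_width.toNat * (stock_height.toNat + 2) + stock_height.toNat + 1 := by
    unfold pvMu
    have : (min stock_height (stock_height + 1)) = stock_height := min_eq_left (by omega)
    rw [this]
    omega
  have hmem := (pvBestGo_correct rects stock_width stock_height hr _
    PySem.Dict.empty stock_width stock_height hfuel hm).2.2 hw hh le_rfl le_rfl
  show ((_ : PySem.Dict _ _).get? _).getD _ = _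
  rw [hmem, Option.getD_some]

-- ===== A-side: the grid dict maps every processed cell to pvF =====
def pvReduceMax (cands : List (Int × List (Int × Int))) : Int × List (Int × Int) :=
  match cands with
  | [] => (0, [])
  | c :: cs => cs.foldl (fun m x => if pvValLt m x then x else m) c

def pvInner (rects : List (Int × Int)) (w : Int)
    (dph : PySem.Dict (Int × Int) (Int × List (Int × Int))) (h : Int) :
    PySem.Dict (Int × Int) (Int × List (Int × Int)) :=
  let cands := rects.map (fun r =>
    let sub := dph.getD (w - r.1, h - r.2) (0, [])
    (sub.1 + 1, sub.2 ++ [r]))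
  let inner := pvReduceMax cands
  let cur := dph.getD (w, h) (0, [])
  dph.insert (w, h) (if pvValLt cur inner then inner else cur)

def pvDp0 : PySem.Dict (Int × Int) (Int × List (Int × Int)) :=
  PySem.Dict.empty.insert (0, 0) (0, [])

theorem pvPortA_eq (W H : Int) (rects : List (Int × Int)) :
    two_dimensional_cutting_stock W H rects =
      (((PySem.List.pyRange 1 (W + 1) 1).foldl (fun dpw w =>
        (PySem.List.pyRange 1 (H + 1) 1).foldl (pvInner rects w) dpw) pvDp0).get? (W, H)).getD (0, []) := rfl

-- the invariant: after processing full columns 1..w-1 and cells (w,1)..(w,hdone) of column w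
def pvInvCol (rects : List (Int × Int)) (Ww Hh : Int)
    (d : PySem.Dict (Int × Int) (Int × List (Int × Int))) (w hdone : Int) : Prop :=
  ∀ k : Int × Int, d.get? k =
    if k = (0, 0) then some (0, [])
    else if 1 ≤ k.1 ∧ k.1 ≤ w - 1 ∧ 1 ≤ k.2 ∧ k.2 ≤ Hh then some (pvF rects Ww Hh k.1 k.2)
    else if k.1 = w ∧ 1 ≤ k.2 ∧ k.2 ≤ hdone then some (pvF rects Ww Hh k.1 k.2)
    else none

theorem pvLookup (rects : List (Int × Int)) (Ww Hh w h : Int) (d) (a b : Int)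
    (hinv : pvInvCol rects Ww Hh d w (h - 1))
    (_hw : 1 ≤ w) (_hh : 1 ≤ h) (_hhH : h ≤ Hh)
    (hab : (1 ≤ a ∧ a ≤ w - 1 ∧ 1 ≤ b ∧ b ≤ Hh) ∨ (a = w ∧ 1 ≤ b ∧ b ≤ h - 1) ∨
      a < 1 ∨ b < 1 ∨ Hh < b) :
    d.getD (a, b) (0, []) = pvF rects Ww Hh a b := by
  rw [PySem.Dict.getD_eq_get?_getD, hinv (a, b)]
  by_cases h00 : ((a, b) : Int × Int) = (0, 0)
  · have ha0 : a = 0 := congrArg Prod.fst h00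
    have hb0 : b = 0 := congrArg Prod.snd h00
    simp only [h00, if_true, Option.getD_some]
    rw [pvF_base rects Ww Hh a b (by omega)]
  · simp only [h00, if_false]
    have hne : a ≠ 0 ∨ b ≠ 0 := by
      by_contra hc
      push_neg at hc
      exact h00 (by simp [hc.1, hc.2])
    by_cases hb1 : 1 ≤ a ∧ a ≤ w - 1 ∧ 1 ≤ b ∧ b ≤ Hh
    · simp [hb1]
    · simp only [hb1, if_false]
      by_cases hb2 : a = w ∧ 1 ≤ b ∧ b ≤ h - 1
      · simp [hb2]
      · simp only [hb2, if_false, Option.getD_none]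
        have hsmall : a < 1 ∨ b < 1 ∨ Hh < b := by omega
        rw [pvF_base rects Ww Hh a b (by omega)]

theorem pvFoldMax_mem (cs : List (Int × List (Int × Int))) (c : Int × List (Int × Int)) :
    cs.foldl (fun m x => if pvValLt m x then x else m) c = c ∨
      cs.foldl (fun m x => if pvValLt m x then x else m) c ∈ cs := by
  induction cs generalizing c with
  | nil => left; rfl
  | cons x t iht =>
    simp only [List.foldl_cons]
    rcases iht (if pvValLt c x then x else c) with hl | hr
    · rw [hl]
      by_cases hc : pvValLt c x = true
      · right; simp [hc]
      · left; simp [hc]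
    · right; simp [hr]

theorem pvMax_reduce (l : List (Int × List (Int × Int))) (hl : l ≠ [])
    (hpos : ∀ x ∈ l, pvValLt (0, []) x = true) :
    (if pvValLt (0, []) (pvReduceMax l) then pvReduceMax l else (0, [])) =
      l.foldl (fun m x => if pvValLt m x then x else m) (0, []) := by
  match l with
  | c :: cs =>
    simp only [pvReduceMax]
    have hin : pvValLt (0, []) (cs.foldl (fun m x => if pvValLt m x then x else m) c) = true := by
      rcases pvFoldMax_mem cs c with hm | hm
      · rw [hm]; exact hpos c (by simp)
      · exact hpos _ (by simp [hm])
    rw [hin, if_pos rfl]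
    have hc : pvValLt (0, []) c = true := hpos c (by simp)
    simp only [List.foldl_cons, hc, if_true]

theorem pvInner_step (rects : List (Int × Int)) (Ww Hh : Int) (hr : pvRectsOK Hh rects) (hne : rects ≠ [])
    (w h : Int) (d) (hw : 1 ≤ w) (hh : 1 ≤ h) (hwW : w ≤ Ww) (hhH : h ≤ Hh)
    (hinv : pvInvCol rects Ww Hh d w (h - 1)) :
    pvInvCol rects Ww Hh (pvInner rects w d h) w h := by
  have hcands : rects.map (fun r =>
      let sub := d.getD (w - r.1, h - r.2) (0, [])
      (sub.1 + 1, sub.2 ++ [r])) = rects.map (fun r =>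
      ((pvF rects Ww Hh (w - r.1) (h - r.2)).1 + 1, (pvF rects Ww Hh (w - r.1) (h - r.2)).2 ++ [r])) := by
    apply List.map_congr_left
    intro r hrm
    have hcond := hr r hrm
    have := pvLookup rects Ww Hh w h d (w - r.1) (h - r.2) hinv hw hh hhH (by omega)
    simp only [this]
  have hcur : d.getD (w, h) (0, []) = (0, []) := by
    rw [PySem.Dict.getD_eq_get?_getD, hinv (w, h)]
    have h00 : ((w, h) : Int × Int) ≠ (0, 0) := by
      intro hc
      have : w = 0 := congrArg Prod.fst hc
      omega
    rw [if_neg h00, if_neg (by omega : ¬ (1 ≤ w ∧ w ≤ w - 1 ∧ 1 ≤ h ∧ h ≤ Hh)),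
        if_neg (by omega : ¬ (w = w ∧ 1 ≤ h ∧ h ≤ h - 1)), Option.getD_none]
  have hval : (let cands := rects.map (fun r =>
        let sub := d.getD (w - r.1, h - r.2) (0, [])
        (sub.1 + 1, sub.2 ++ [r]))
      let inner := pvReduceMax cands
      let cur := d.getD (w, h) (0, [])
      (if pvValLt cur inner then inner else cur)) = pvF rects Ww Hh w h := by
    simp only [hcands, hcur]
    rw [pvMax_reduce]
    · rw [List.foldl_map]
      rw [← pvF_unfold rects Ww Hh hr w h hw hh hwW hhH]
    · simp [hne]
    · intro x hx
      simp only [List.mem_map] at hx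
      obtain ⟨r, _, hxr⟩ := hx
      have hnn := pvF_fst_nonneg rects Ww Hh (w - r.1) (h - r.2)
      simp only [pvValLt, ← hxr]
      simp
      omega
  intro k
  show ((d.insert (w, h) _).get? k) = _
  rw [PySem.Dict.get?_insert]
  by_cases hk : k = ((w, h) : Int × Int)
  · rw [if_pos hk, hval]
    have h00 : ((w, h) : Int × Int) ≠ (0, 0) := by
      intro hc
      have : w = 0 := congrArg Prod.fst hc
      omega
    rw [hk]
    rw [if_neg h00, if_neg (by omega : ¬ (1 ≤ (w, h).1 ∧ (w, h).1 ≤ w - 1 ∧ 1 ≤ (w, h).2 ∧ (w, h).2 ≤ Hh)),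
        if_pos (by constructor <;> [rfl; omega] : ((w, h).1 = w ∧ 1 ≤ (w, h).2 ∧ (w, h).2 ≤ h))]
  · rw [if_neg hk, hinv k]
    have hkk : k.1 ≠ w ∨ k.2 ≠ h := by
      by_contra hc
      push_neg at hc
      exact hk (by rw [← hc.1, ← hc.2])
    by_cases h00 : k = ((0, 0) : Int × Int)
    · rw [if_pos h00, if_pos h00]
    · rw [if_neg h00, if_neg h00]
      by_cases hb1 : 1 ≤ k.1 ∧ k.1 ≤ w - 1 ∧ 1 ≤ k.2 ∧ k.2 ≤ Hh
      · rw [if_pos hb1, if_pos hb1]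
      · rw [if_neg hb1, if_neg hb1]
        by_cases hb2 : k.1 = w ∧ 1 ≤ k.2 ∧ k.2 ≤ h - 1
        · rw [if_pos hb2, if_pos (by omega : k.1 = w ∧ 1 ≤ k.2 ∧ k.2 ≤ h)]
        · rw [if_neg hb2, if_neg (by omega : ¬ (k.1 = w ∧ 1 ≤ k.2 ∧ k.2 ≤ h))]

theorem pvCol_fold (rects : List (Int × Int)) (Ww Hh : Int) (hr : pvRectsOK Hh rects) (hne : rects ≠ [])
    (w : Int) (hw : 1 ≤ w) (hwW : w ≤ Ww) (d) (h0 : pvInvCol rects Ww Hh d w 0) :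
    ∀ n : Nat, (n : Int) ≤ Hh →
      pvInvCol rects Ww Hh ((PySem.List.pyRange 1 ((n : Int) + 1) 1).foldl (pvInner rects w) d) w n := by
  intro n
  induction n with
  | zero =>
    intro _
    rw [PySem.List.pyRange_one_eq_nil (by norm_num)]
    simpa using h0
  | succ n ihn =>
    intro hle
    have hsplit : PySem.List.pyRange 1 ((n : Int) + 1 + 1) 1 =
        PySem.List.pyRange 1 ((n : Int) + 1) 1 ++ [(n : Int) + 1] := by
      exact PySem.List.pyRange_one_succ_right (by omega)
    have hcast : ((n + 1 : Nat) : Int) = (n : Int) + 1 := by push_cast; ring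
    rw [hcast, hsplit, List.foldl_append]
    simp only [List.foldl_cons, List.foldl_nil]
    have hprev := ihn (by omega)
    have := pvInner_step rects Ww Hh hr hne w ((n : Int) + 1) _ hw (by omega) hwW (by omega)
      (by simpa using hprev)
    simpa using this

theorem pvCol_advance (rects : List (Int × Int)) (Ww Hh : Int) (d) (w : Int) (hw : 1 ≤ w)
    (h : pvInvCol rects Ww Hh d w Hh) : pvInvCol rects Ww Hh d (w + 1) 0 := by
  intro k
  rw [h k]
  by_cases h00 : k = ((0, 0) : Int × Int)
  · rw [if_pos h00, if_pos h00]
  · rw [if_neg h00, if_neg h00]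
    have hk2 : ¬ (k.1 = w + 1 ∧ 1 ≤ k.2 ∧ k.2 ≤ 0) := by omega
    rw [if_neg hk2]
    by_cases hb1 : 1 ≤ k.1 ∧ k.1 ≤ w - 1 ∧ 1 ≤ k.2 ∧ k.2 ≤ Hh
    · rw [if_pos hb1, if_pos (by omega : 1 ≤ k.1 ∧ k.1 ≤ w + 1 - 1 ∧ 1 ≤ k.2 ∧ k.2 ≤ Hh)]
    · rw [if_neg hb1]
      by_cases hb2 : k.1 = w ∧ 1 ≤ k.2 ∧ k.2 ≤ Hh
      · rw [if_pos hb2, if_pos (by omega : 1 ≤ k.1 ∧ k.1 ≤ w + 1 - 1 ∧ 1 ≤ k.2 ∧ k.2 ≤ Hh)]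
      · rw [if_neg hb2, if_neg (by omega : ¬ (1 ≤ k.1 ∧ k.1 ≤ w + 1 - 1 ∧ 1 ≤ k.2 ∧ k.2 ≤ Hh))]

theorem pvDp0_inv (rects : List (Int × Int)) (Ww Hh : Int) : pvInvCol rects Ww Hh pvDp0 1 0 := by
  intro k
  show (PySem.Dict.empty.insert ((0 : Int), (0 : Int)) ((0 : Int), ([] : List (Int × Int)))).get? k = _
  rw [PySem.Dict.get?_insert]
  by_cases h00 : k = ((0, 0) : Int × Int)
  · simp only [h00, if_true]
  · have hb1 : ¬ (1 ≤ k.1 ∧ k.1 ≤ 1 - 1 ∧ 1 ≤ k.2 ∧ k.2 ≤ Hh) := by omega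
    have hb2 : ¬ (k.1 = 1 ∧ 1 ≤ k.2 ∧ k.2 ≤ 0) := by omega
    simp only [h00, hb1, hb2, if_false, PySem.Dict.get?_empty]

theorem pvOuter_fold (rects : List (Int × Int)) (Ww Hh : Int) (hr : pvRectsOK Hh rects) (hne : rects ≠ [])
    (hH : 1 ≤ Hh) :
    ∀ m : Nat, (m : Int) ≤ Ww →
      pvInvCol rects Ww Hh ((PySem.List.pyRange 1 ((m : Int) + 1) 1).foldl (fun dpw w =>
        (PySem.List.pyRange 1 (Hh + 1) 1).foldl (pvInner rects w) dpw) pvDp0) ((m : Int) + 1) 0 := by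
  intro m
  induction m with
  | zero =>
    intro _
    rw [show PySem.List.pyRange 1 (((0 : Nat) : Int) + 1) 1 = [] from
      PySem.List.pyRange_one_eq_nil (by norm_num)]
    simpa using pvDp0_inv rects Ww Hh
  | succ m ihm =>
    intro hle
    have hcast : ((m + 1 : Nat) : Int) = (m : Int) + 1 := by push_cast; ring
    have hsplit : PySem.List.pyRange 1 ((m : Int) + 1 + 1) 1 =
        PySem.List.pyRange 1 ((m : Int) + 1) 1 ++ [(m : Int) + 1] := by
      exact PySem.List.pyRange_one_succ_right (by omega)
    rw [hcast, hsplit, List.foldl_append]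
    simp only [List.foldl_cons, List.foldl_nil]
    have hHt : ((Hh.toNat : Int)) = Hh := by omega
    have hcol := pvCol_fold rects Ww Hh hr hne ((m : Int) + 1) (by omega) (by omega) _
      (ihm (by omega)) Hh.toNat (by omega)
    rw [hHt] at hcol
    exact pvCol_advance rects Ww Hh _ _ (by omega) hcol

-- ===== the all-inert branch: every rectangle steps out of the grid, both sides see only (0, []) =====
def pvBadOK (sh : Int) (rects : List (Int × Int)) : Prop :=
  ∀ r ∈ rects, r.1 < 0 ∨ (r.1 = 0 ∧ r.2 < 0) ∨ sh ≤ r.2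

def pvC (rects : List (Int × Int)) : Int × List (Int × Int) :=
  rects.foldl (fun m r => if pvValLt m (1, [r]) then (1, [r]) else m) (0, [])

theorem pvValLt_zero_one (r : Int × Int) (l : List (Int × Int)) :
    pvValLt (0, []) (1, r :: l) = true := by
  simp [pvValLt]

theorem alt_allbad (sw sh : Int) (rects : List (Int × Int)) (hb : pvBadOK sh rects)
    (hw : 1 ≤ sw) (hh : 1 ≤ sh) :
    two_dimensional_cutting_stock_alt sw sh rects = pvC rects := by
  show (((pvBestGo rects sw sh (sw.toNat * (sh.toNat + 2) + sh.toNat + 1)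
      PySem.Dict.empty sw sh).2).get? (sw, sh)).getD (0, []) = _
  simp only [pvBestGo]
  have hwh : (sw < 1 || sh < 1 || sw < sw || sh < sh) = false := by simp; omega
  simp only [hwh, Bool.false_eq_true, if_false, PySem.Dict.get?_empty]
  have aux : ∀ (l : List (Int × Int)), (∀ r ∈ l, r ∈ rects) →
      ∀ (acc : (Int × List (Int × Int)) × PySem.Dict (Int × Int) (Int × List (Int × Int))),
      (l.foldl (fun acc r =>
        let sm := pvBestGo rects sw sh (sw.toNat * (sh.toNat + 2) + sh.toNat) acc.2 (sw - r.1) (sh - r.2)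
        let cand := (sm.1.1 + 1, sm.1.2 ++ [r])
        (if pvValLt acc.1 cand then cand else acc.1, sm.2)) acc) =
      (l.foldl (fun m r => if pvValLt m (1, [r]) then (1, [r]) else m) acc.1, acc.2) := by
    intro l
    induction l with
    | nil => intro _ acc; rfl
    | cons r t iht =>
      intro hmem acc
      have hbase : sw - r.1 < 1 ∨ sh - r.2 < 1 ∨ sw < sw - r.1 ∨ sh < sh - r.2 := by
        have := hb r (hmem r (by simp))
        omega
      have hv : pvBestGo rects sw sh (sw.toNat * (sh.toNat + 2) + sh.toNat) acc.2
          (sw - r.1) (sh - r.2) = ((0, []), acc.2) :=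
        pvBestGo_base_any rects sw sh _ _ hbase _ acc.2
      simp only [List.foldl_cons, hv, List.nil_append, zero_add]
      exact iht (fun x hx => hmem x (by simp [hx])) _
  rw [aux rects (fun _ hx => hx) ((0, []), PySem.Dict.empty)]
  rw [PySem.Dict.get?_insert, if_pos rfl, Option.getD_some]
  rfl

-- the A-side invariant for the inert branch: every processed cell holds the constant pvC
def pvInvColC (C : Int × List (Int × Int)) (Hh : Int)
    (d : PySem.Dict (Int × Int) (Int × List (Int × Int))) (w hdone : Int) : Prop :=
  ∀ k : Int × Int, d.get? k =
    if k = (0, 0) then some (0, [])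
    else if 1 ≤ k.1 ∧ k.1 ≤ w - 1 ∧ 1 ≤ k.2 ∧ k.2 ≤ Hh then some C
    else if k.1 = w ∧ 1 ≤ k.2 ∧ k.2 ≤ hdone then some C
    else none

theorem pvInner_stepC (rects : List (Int × Int)) (Hh : Int) (hb : pvBadOK Hh rects)
    (hne : rects ≠ []) (w h : Int) (d) (hw : 1 ≤ w) (hh : 1 ≤ h) (hhH : h ≤ Hh)
    (hinv : pvInvColC (pvC rects) Hh d w (h - 1)) :
    pvInvColC (pvC rects) Hh (pvInner rects w d h) w h := by
  have hlook : ∀ r ∈ rects, d.getD (w - r.1, h - r.2) (0, []) = (0, []) := by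
    intro r hrm
    have hbad := hb r hrm
    rw [PySem.Dict.getD_eq_get?_getD, hinv (w - r.1, h - r.2)]
    by_cases h00 : ((w - r.1, h - r.2) : Int × Int) = (0, 0)
    · simp [h00]
    · rw [if_neg h00,
          if_neg (by omega : ¬ (1 ≤ w - r.1 ∧ w - r.1 ≤ w - 1 ∧ 1 ≤ h - r.2 ∧ h - r.2 ≤ Hh)),
          if_neg (by omega : ¬ (w - r.1 = w ∧ 1 ≤ h - r.2 ∧ h - r.2 ≤ h - 1)), Option.getD_none]
  have hcands : rects.map (fun r =>
      let sub := d.getD (w - r.1, h - r.2) (0, [])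
      (sub.1 + 1, sub.2 ++ [r])) = rects.map (fun r => ((1 : Int), [r])) := by
    apply List.map_congr_left
    intro r hrm
    simp [hlook r hrm]
  have hcur : d.getD (w, h) (0, []) = (0, []) := by
    rw [PySem.Dict.getD_eq_get?_getD, hinv (w, h)]
    have h00 : ((w, h) : Int × Int) ≠ (0, 0) := by
      intro hc
      have : w = 0 := congrArg Prod.fst hc
      omega
    rw [if_neg h00, if_neg (by omega : ¬ (1 ≤ w ∧ w ≤ w - 1 ∧ 1 ≤ h ∧ h ≤ Hh)),
        if_neg (by omega : ¬ (w = w ∧ 1 ≤ h ∧ h ≤ h - 1)), Option.getD_none]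
  have hval : (let cands := rects.map (fun r =>
        let sub := d.getD (w - r.1, h - r.2) (0, [])
        (sub.1 + 1, sub.2 ++ [r]))
      let inner := pvReduceMax cands
      let cur := d.getD (w, h) (0, [])
      (if pvValLt cur inner then inner else cur)) = pvC rects := by
    simp only [hcands, hcur]
    rw [pvMax_reduce]
    · rw [List.foldl_map]
      rfl
    · simp [hne]
    · intro x hx
      simp only [List.mem_map] at hx
      obtain ⟨r, _, hxr⟩ := hx
      rw [← hxr]
      exact pvValLt_zero_one r []
  intro k
  show ((d.insert (w, h) _).get? k) = _
  rw [PySem.Dict.get?_insert]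
  by_cases hk : k = ((w, h) : Int × Int)
  · rw [if_pos hk, hval]
    have h00 : ((w, h) : Int × Int) ≠ (0, 0) := by
      intro hc
      have : w = 0 := congrArg Prod.fst hc
      omega
    rw [hk]
    rw [if_neg h00, if_neg (by omega : ¬ (1 ≤ (w, h).1 ∧ (w, h).1 ≤ w - 1 ∧ 1 ≤ (w, h).2 ∧ (w, h).2 ≤ Hh)),
        if_pos (by constructor <;> [rfl; omega] : ((w, h).1 = w ∧ 1 ≤ (w, h).2 ∧ (w, h).2 ≤ h))]
  · rw [if_neg hk, hinv k]
    have hkk : k.1 ≠ w ∨ k.2 ≠ h := by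
      by_contra hc
      push_neg at hc
      exact hk (by rw [← hc.1, ← hc.2])
    by_cases h00 : k = ((0, 0) : Int × Int)
    · rw [if_pos h00, if_pos h00]
    · rw [if_neg h00, if_neg h00]
      by_cases hb1 : 1 ≤ k.1 ∧ k.1 ≤ w - 1 ∧ 1 ≤ k.2 ∧ k.2 ≤ Hh
      · rw [if_pos hb1, if_pos hb1]
      · rw [if_neg hb1, if_neg hb1]
        by_cases hb2 : k.1 = w ∧ 1 ≤ k.2 ∧ k.2 ≤ h - 1
        · rw [if_pos hb2, if_pos (by omega : k.1 = w ∧ 1 ≤ k.2 ∧ k.2 ≤ h)]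
        · rw [if_neg hb2, if_neg (by omega : ¬ (k.1 = w ∧ 1 ≤ k.2 ∧ k.2 ≤ h))]

theorem pvCol_foldC (rects : List (Int × Int)) (Hh : Int) (hb : pvBadOK Hh rects)
    (hne : rects ≠ []) (w : Int) (hw : 1 ≤ w) (d)
    (h0 : pvInvColC (pvC rects) Hh d w 0) :
    ∀ n : Nat, (n : Int) ≤ Hh →
      pvInvColC (pvC rects) Hh ((PySem.List.pyRange 1 ((n : Int) + 1) 1).foldl (pvInner rects w) d) w n := by
  intro n
  induction n with
  | zero =>
    intro _
    rw [PySem.List.pyRange_one_eq_nil (by norm_num)]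
    simpa using h0
  | succ n ihn =>
    intro hle
    have hsplit : PySem.List.pyRange 1 ((n : Int) + 1 + 1) 1 =
        PySem.List.pyRange 1 ((n : Int) + 1) 1 ++ [(n : Int) + 1] := by
      exact PySem.List.pyRange_one_succ_right (by omega)
    have hcast : ((n + 1 : Nat) : Int) = (n : Int) + 1 := by push_cast; ring
    rw [hcast, hsplit, List.foldl_append]
    simp only [List.foldl_cons, List.foldl_nil]
    have := pvInner_stepC rects Hh hb hne w ((n : Int) + 1) _ hw (by omega) (by omega)
      (by simpa using ihn (by omega))
    simpa using this

theorem pvCol_advanceC (C : Int × List (Int × Int)) (Hh : Int) (d) (w : Int) (hw : 1 ≤ w)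
    (h : pvInvColC C Hh d w Hh) : pvInvColC C Hh d (w + 1) 0 := by
  intro k
  rw [h k]
  by_cases h00 : k = ((0, 0) : Int × Int)
  · rw [if_pos h00, if_pos h00]
  · rw [if_neg h00, if_neg h00]
    have hk2 : ¬ (k.1 = w + 1 ∧ 1 ≤ k.2 ∧ k.2 ≤ 0) := by omega
    rw [if_neg hk2]
    by_cases hb1 : 1 ≤ k.1 ∧ k.1 ≤ w - 1 ∧ 1 ≤ k.2 ∧ k.2 ≤ Hh
    · rw [if_pos hb1, if_pos (by omega : 1 ≤ k.1 ∧ k.1 ≤ w + 1 - 1 ∧ 1 ≤ k.2 ∧ k.2 ≤ Hh)]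
    · rw [if_neg hb1]
      by_cases hb2 : k.1 = w ∧ 1 ≤ k.2 ∧ k.2 ≤ Hh
      · rw [if_pos hb2, if_pos (by omega : 1 ≤ k.1 ∧ k.1 ≤ w + 1 - 1 ∧ 1 ≤ k.2 ∧ k.2 ≤ Hh)]
      · rw [if_neg hb2, if_neg (by omega : ¬ (1 ≤ k.1 ∧ k.1 ≤ w + 1 - 1 ∧ 1 ≤ k.2 ∧ k.2 ≤ Hh))]

theorem pvDp0_invC (C : Int × List (Int × Int)) (Hh : Int) : pvInvColC C Hh pvDp0 1 0 := by
  intro k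
  show (PySem.Dict.empty.insert ((0 : Int), (0 : Int)) ((0 : Int), ([] : List (Int × Int)))).get? k = _
  rw [PySem.Dict.get?_insert]
  by_cases h00 : k = ((0, 0) : Int × Int)
  · simp only [h00, if_true]
  · have hb1 : ¬ (1 ≤ k.1 ∧ k.1 ≤ 1 - 1 ∧ 1 ≤ k.2 ∧ k.2 ≤ Hh) := by omega
    have hb2 : ¬ (k.1 = 1 ∧ 1 ≤ k.2 ∧ k.2 ≤ 0) := by omega
    simp only [h00, hb1, hb2, if_false, PySem.Dict.get?_empty]

theorem pvOuter_foldC (rects : List (Int × Int)) (Hh : Int) (hb : pvBadOK Hh rects)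
    (hne : rects ≠ []) (hH : 1 ≤ Hh) :
    ∀ m : Nat,
      pvInvColC (pvC rects) Hh ((PySem.List.pyRange 1 ((m : Int) + 1) 1).foldl (fun dpw w =>
        (PySem.List.pyRange 1 (Hh + 1) 1).foldl (pvInner rects w) dpw) pvDp0) ((m : Int) + 1) 0 := by
  intro m
  induction m with
  | zero =>
    rw [show PySem.List.pyRange 1 (((0 : Nat) : Int) + 1) 1 = [] from
      PySem.List.pyRange_one_eq_nil (by norm_num)]
    simpa using pvDp0_invC (pvC rects) Hh
  | succ m ihm =>
    have hcast : ((m + 1 : Nat) : Int) = (m : Int) + 1 := by push_cast; ring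
    have hsplit : PySem.List.pyRange 1 ((m : Int) + 1 + 1) 1 =
        PySem.List.pyRange 1 ((m : Int) + 1) 1 ++ [(m : Int) + 1] := by
      exact PySem.List.pyRange_one_succ_right (by omega)
    rw [hcast, hsplit, List.foldl_append]
    simp only [List.foldl_cons, List.foldl_nil]
    have hHt : ((Hh.toNat : Int)) = Hh := by omega
    have hcol := pvCol_foldC rects Hh hb hne ((m : Int) + 1) (by omega) _ ihm Hh.toNat (by omega)
    rw [hHt] at hcol
    exact pvCol_advanceC (pvC rects) Hh _ _ (by omega) hcol

-- ===== VERDICT (by name: the statement is the Claim_ definition above) =====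
theorem two_dimensional_cutting_stock_spec : Claim_equal_two_dimensional_cutting_stock := by
  intro W H rects _ hpre
  unfold Spec_two_dimensional_cutting_stock
  obtain ⟨hW, hH, hne, hrects | hrects⟩ := hpre
  · have hr : pvRectsOK H rects := hrects
    rw [pvPortA_eq, alt_eq_pvF W H rects hr hW hH]
    have hWt : ((W.toNat : Int)) = W := by omega
    have hfold := pvOuter_fold rects W H hr hne hH W.toNat (by omega)
    rw [hWt] at hfold
    have hget := hfold (W, H)
    rw [if_neg (by intro hc; have : W = 0 := congrArg Prod.fst hc; omega),
        if_pos (by refine ⟨by omega, by omega, by omega, by omega⟩ :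
          (1 ≤ ((W, H) : Int × Int).1 ∧ ((W, H) : Int × Int).1 ≤ W + 1 - 1 ∧
            1 ≤ ((W, H) : Int × Int).2 ∧ ((W, H) : Int × Int).2 ≤ H))] at hget
    rw [hget, Option.getD_some]
  · have hb : pvBadOK H rects := hrects
    rw [pvPortA_eq, alt_allbad W H rects hb hW hH]
    have hWt : ((W.toNat : Int)) = W := by omega
    have hfold := pvOuter_foldC rects H hb hne hH W.toNat
    rw [hWt] at hfold
    have hget := hfold (W, H)
    rw [if_neg (by intro hc; have : W = 0 := congrArg Prod.fst hc; omega),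
        if_pos (by refine ⟨by omega, by omega, by omega, by omega⟩ :
          (1 ≤ ((W, H) : Int × Int).1 ∧ ((W, H) : Int × Int).1 ≤ W + 1 - 1 ∧
            1 ≤ ((W, H) : Int × Int).2 ∧ ((W, H) : Int × Int).2 ≤ H))] at hget
    rw [hget, Option.getD_some]
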